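-- pv_equiv track=rewrite | github.com/nicholasbien/todolist | backend/chat_sessions.py | _distribution_summary
-- ===== SOURCE A (Python) =====
-- import math
-- from typing import Any, Dict, List, Optional
--
-- def _percentile(values: List[int], percentile: int) -> Optional[int]:
--     """Compute percentile using nearest-rank method."""
--     if not values:
--         return None
--     sorted_values = sorted(values)
--     rank = int(math.ceil((percentile / 100.0) * len(sorted_values)))
--     idx = max(0, min(len(sorted_values) - 1, rank - 1))
--     return sorted_values[idx]
--
-- def _distribution_summary(
--     values: List[int], breach_threshold: Optional[int]
-- ) -> Dict[str, Any]:
--     """Return count, percentiles, and optional SLA breach count."""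
--     if not values:
--         return {
--             "count": 0,
--             "p50": None,
--             "p90": None,
--             "p95": None,
--             "sla_breach_count": 0,
--         }
--
--     breaches = 0
--     if breach_threshold is not None:
--         breaches = sum(1 for value in values if value > breach_threshold)
--
--     return {
--         "count": len(values),
--         "p50": _percentile(values, 50),
--         "p90": _percentile(values, 90),
--         "p95": _percentile(values, 95),
--         "sla_breach_count": breaches,
--     }
-- ===== SOURCE B (Python) =====
-- from typing import Any, Dict, List, Optional
--
--
-- def _distribution_summary(
--     values: List[int], breach_threshold: Optional[int]
-- ) -> Dict[str, Any]:
--     """Frequency map over distinct values; percentiles via cumulative-count scan."""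
--     if not values:
--         return {
--             "count": 0,
--             "p50": None,
--             "p90": None,
--             "p95": None,
--             "sla_breach_count": 0,
--         }
--
--     n = len(values)
--     freq: Dict[int, int] = {}
--     for v in values:
--         freq[v] = freq.get(v, 0) + 1
--     keys = sorted(freq)  # distinct values only, ascending
--
--     def kth(r: int) -> int:
--         # r-th smallest (1-based): first key whose cumulative count reaches r
--         cum = 0
--         for k in keys:
--             cum += freq[k]
--             if r <= cum:
--                 return k
--         return keys[-1]  # unreachable for 1 <= r <= n
--
--     def rank(p: int) -> int:
--         # clamped nearest-rank: ceil(p*n/100) forced into 1..n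
--         return min(n, max(1, -((-p * n) // 100)))
--
--     breaches = 0
--     if breach_threshold is not None:
--         breaches = sum(freq[k] for k in keys if k > breach_threshold)
--
--     return {
--         "count": n,
--         "p50": kth(rank(50)),
--         "p90": kth(rank(90)),
--         "p95": kth(rank(95)),
--         "sla_breach_count": breaches,
--     }
-- ===== Notes on version B (the rewrite author's own statement) =====
-- stated objective: alternative
-- what changed: B builds a value->frequency map in one pass, sorts only the distinct keys, and reads each percentile as the first key whose cumulative count reaches the clamped nearest rank (and sums frequencies of keys above the threshold for breaches), instead of A's per-percentile full sort plus direct index into the sorted array and per-element generator count.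
import Mathlib
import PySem

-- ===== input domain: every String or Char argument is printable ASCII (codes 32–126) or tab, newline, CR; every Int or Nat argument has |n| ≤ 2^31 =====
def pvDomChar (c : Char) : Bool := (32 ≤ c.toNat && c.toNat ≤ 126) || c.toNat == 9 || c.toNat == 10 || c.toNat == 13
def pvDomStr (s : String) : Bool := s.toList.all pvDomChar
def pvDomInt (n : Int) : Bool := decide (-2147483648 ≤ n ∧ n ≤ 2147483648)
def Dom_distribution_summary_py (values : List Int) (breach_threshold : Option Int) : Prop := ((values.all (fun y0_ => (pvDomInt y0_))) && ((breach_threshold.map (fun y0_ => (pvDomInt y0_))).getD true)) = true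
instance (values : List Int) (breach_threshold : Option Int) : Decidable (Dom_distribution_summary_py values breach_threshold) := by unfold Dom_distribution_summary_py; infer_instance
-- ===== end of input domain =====

-- B replaces A's per-percentile full sort + array index by a frequency map over distinct
-- values and a cumulative-count scan (alternative algorithm); return-value equivalence, no mutation either side.
-- ===== PORT A =====
-- port of _percentile: per-call sort, float ceil int(math.ceil((p/100.0)*n)) ported as the exact
-- integer ceiling -((-(p*n))//100) — exact for the constants 50/90/95 at any list length ≤ 2^31
-- (the float product's relative error is far below the distance to the next integer there).
def pvPercentile (values : List Int) (percentile : Int) : Option Int :=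
  if values = [] then none
  else
    let sorted_values := PySem.List.sorted values (fun x => x) false
    let rank : Int := -(PySem.Int.floordiv (-(percentile * (sorted_values.length : Int))) 100)
    let idx : Int := max 0 (min ((sorted_values.length : Int) - 1) (rank - 1))
    some (PySem.List.pyGetD sorted_values idx 0)  -- idx clamped into range, so sorted_values[idx] never raises

def distribution_summary_py (values : List Int) (breach_threshold : Option Int) : List (String × Option Int) :=
  if values = [] then
    [("count", some 0), ("p50", none), ("p90", none), ("p95", none), ("sla_breach_count", some 0)]
  else
    let breaches : Int :=
      match breach_threshold with
      | none => 0
      | some t => ((values.filter (fun v => t < v)).map (fun _ => (1 : Int))).sum  -- sum(1 for v in values if v > t)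
    [("count", some (values.length : Int)),
     ("p50", pvPercentile values 50),
     ("p90", pvPercentile values 90),
     ("p95", pvPercentile values 95),
     ("sla_breach_count", some breaches)]

-- ===== PORT B =====
-- the loop 'freq[v] = freq.get(v, 0) + 1'
def pvFreq (values : List Int) : PySem.Dict Int Int :=
  values.foldl (fun d v => d.insert v (d.getD v 0 + 1)) PySem.Dict.empty

-- the 'for k in keys: cum += freq[k]; if r <= cum: return k' loop (none = fell through)
def pvKthLoop (freq : PySem.Dict Int Int) (r : Int) : List Int → Int → Option Int
  | [], _ => none
  | k :: ks, cum =>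
    let cum' := cum + freq.getD k 0
    if r ≤ cum' then some k else pvKthLoop freq r ks cum'

def distribution_summary_py_alt (values : List Int) (breach_threshold : Option Int) : List (String × Option Int) :=
  if values = [] then
    [("count", some 0), ("p50", none), ("p90", none), ("p95", none), ("sla_breach_count", some 0)]
  else
    let n : Int := values.length
    let freq := pvFreq values
    let keys := PySem.List.sorted freq.keys (fun x => x) false
    let kth : Int → Int := fun r =>
      match pvKthLoop freq r keys 0 with
      | some k => k
      | none => PySem.List.pyGetD keys (-1) 0  -- keys[-1]; unreachable for 1 ≤ r ≤ n
    let rank : Int → Int := fun p => min n (max 1 (-(PySem.Int.floordiv (-(p * n)) 100)))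
    let breaches : Int :=
      match breach_threshold with
      | none => 0
      | some t => ((keys.filter (fun k => t < k)).map (fun k => freq.getD k 0)).sum
    [("count", some n),
     ("p50", some (kth (rank 50))),
     ("p90", some (kth (rank 90))),
     ("p95", some (kth (rank 95))),
     ("sla_breach_count", some breaches)]

-- ===== PRECONDITION & SPEC =====
def Spec_distribution_summary_py (values : List Int) (breach_threshold : Option Int) (out : List (String × Option Int)) : Prop := out = distribution_summary_py_alt values breach_threshold
instance (values : List Int) (breach_threshold : Option Int) (out : List (String × Option Int)) : Decidable (Spec_distribution_summary_py values breach_threshold out) := by unfold Spec_distribution_summary_py; infer_instance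

-- ===== CLAIM (what is proved, stated in full; the proofs are below) =====
def Claim_equal_distribution_summary_py : Prop := ∀ (values : List Int) (breach_threshold : Option Int), Dom_distribution_summary_py values breach_threshold → Spec_distribution_summary_py values breach_threshold (distribution_summary_py values breach_threshold)

-- ===== LEMMAS AND PROOFS =====

-- the sorted list of values, rebuilt from its sorted distinct keys and multiplicities
def pvRep (values : List Int) (ks : List Int) : List Int :=
  ks.flatMap (fun k => List.replicate (values.count k) k)

lemma pv_count_rep (values : List Int) (ks : List Int) (hnd : ks.Nodup) (x : Int) :
    (pvRep values ks).count x = if x ∈ ks then values.count x else 0 := by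
  induction ks with
  | nil => simp [pvRep]
  | cons k ks ih =>
    rcases List.nodup_cons.mp hnd with ⟨hk, hnd'⟩
    simp only [pvRep, List.flatMap_cons, List.count_append, List.count_replicate]
    rw [show (ks.flatMap fun k => List.replicate (values.count k) k) = pvRep values ks from rfl,
        ih hnd']
    by_cases hx : x = k
    · subst hx; simp [hk]
    · simp [hx, List.mem_cons]
      intro h; exact absurd h.symm hx

lemma pv_pairwise_rep (values : List Int) (ks : List Int) (h : ks.Pairwise (· < ·)) :
    (pvRep values ks).Pairwise (· ≤ ·) := by
  induction ks with
  | nil => simp [pvRep]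
  | cons k ks ih =>
    rcases List.pairwise_cons.mp h with ⟨hk, h'⟩
    simp only [pvRep, List.flatMap_cons]
    apply List.pairwise_append.mpr
    refine ⟨List.pairwise_replicate.mpr (by simp), ih h', ?_⟩
    intro a ha b hb
    have ha' : a = k := List.eq_of_mem_replicate ha
    rcases List.mem_flatMap.mp hb with ⟨k', hk', hb'⟩
    have hb'' : b = k' := List.eq_of_mem_replicate hb'
    subst ha'; subst hb''
    exact le_of_lt (hk _ hk')

lemma pv_perm_rep (values : List Int) (ks : List Int) (hnd : ks.Nodup)
    (hmem : ∀ x, x ∈ ks ↔ x ∈ values) : (pvRep values ks).Perm values := by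
  apply List.perm_iff_count.mpr
  intro x
  rw [pv_count_rep values ks hnd x]
  by_cases hx : x ∈ ks
  · simp [hx]
  · have : x ∉ values := fun h => hx ((hmem x).mpr h)
    simp [hx, List.count_eq_zero_of_not_mem this]

lemma pv_kth_loop_spec (freq : PySem.Dict Int Int) (values : List Int) (ks : List Int)
    (hc : ∀ k ∈ ks, freq.getD k 0 = (values.count k : Int)) (r cum : Int)
    (h1 : cum < r) (h2 : r ≤ cum + ((pvRep values ks).length : Int)) :
    pvKthLoop freq r ks cum = some (PySem.List.pyGetD (pvRep values ks) (r - cum - 1) 0) := by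
  induction ks generalizing cum with
  | nil => simp [pvRep] at h2; omega
  | cons k ks ih =>
    have hck := hc k (List.mem_cons_self)
    simp only [pvKthLoop, hck]
    have hlen : (pvRep values (k :: ks)).length
        = values.count k + (pvRep values ks).length := by
      simp [pvRep]
    by_cases hle : r ≤ cum + (values.count k : Int)
    · rw [if_pos hle]
      have hnn : 0 ≤ r - cum - 1 := by omega
      have hlt : (r - cum - 1).toNat < values.count k := by omega
      rw [PySem.List.pyGetD_of_nonneg _ _ hnn]
      have hlt' : (r - cum - 1).toNat < (pvRep values (k :: ks)).length := by omega
      rw [List.getD_eq_getElem _ _ hlt']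
      congr 1
      symm
      show (pvRep values (k :: ks))[(r - cum - 1).toNat] = k
      simp only [pvRep, List.flatMap_cons]
      rw [List.getElem_append_left (by simpa using hlt)]
      exact List.getElem_replicate _
    · rw [if_neg hle]
      have h2' : r ≤ cum + (values.count k : Int) + ((pvRep values ks).length : Int) := by
        rw [hlen] at h2; push_cast at h2 ⊢; omega
      rw [ih (fun k hk => hc k (List.mem_cons_of_mem _ hk)) (cum + (values.count k : Int))
          (by omega) h2']
      congr 1
      have hnn : 0 ≤ r - (cum + (values.count k : Int)) - 1 := by omega
      rw [PySem.List.pyGetD_of_nonneg _ _ hnn,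
          PySem.List.pyGetD_of_nonneg _ _ (by omega : (0:Int) ≤ r - cum - 1)]
      have hlt2 : (r - (cum + (values.count k : Int)) - 1).toNat < (pvRep values ks).length := by
        omega
      have hlt1 : (r - cum - 1).toNat < (pvRep values (k :: ks)).length := by omega
      rw [List.getD_eq_getElem _ _ hlt2, List.getD_eq_getElem _ _ hlt1]
      show _ = (pvRep values (k :: ks))[(r - cum - 1).toNat]
      simp only [pvRep, List.flatMap_cons]
      rw [List.getElem_append_right (by simp; omega)]
      congr 1
      simp; omega

lemma pv_filter_rep (values : List Int) (ks : List Int) (q : Int → Bool) :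
    (((pvRep values ks).filter q).length : Int)
      = ((ks.filter q).map (fun k => (values.count k : Int))).sum := by
  induction ks with
  | nil => simp [pvRep]
  | cons k ks ih =>
    simp only [pvRep, List.flatMap_cons, List.filter_append, List.length_append, List.filter_cons,
      List.filter_replicate]
    rw [show (ks.flatMap fun k => List.replicate (values.count k) k) = pvRep values ks from rfl]
    by_cases hq : q k = true
    · simp only [hq, if_true, List.map_cons, List.sum_cons, List.length_replicate]
      push_cast
      rw [ih]
    · simp only [hq, Bool.false_eq_true, if_false, List.length_nil, Nat.zero_add]
      exact ih

-- ===== VERDICT (by name: the statement is the Claim_ definition above) =====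
theorem distribution_summary_py_spec : Claim_equal_distribution_summary_py := by
  intro values breach_threshold _
  unfold Spec_distribution_summary_py distribution_summary_py distribution_summary_py_alt pvPercentile
  by_cases hv : values = []
  · simp [hv]
  · -- shared structures
    have hfreq : pvFreq values = PySem.Dict.counter values :=
      PySem.Dict.foldl_insert_getD_add_one_eq_counter values
    have hkeys : (pvFreq values).keys = PySem.Set.ofList values := by
      rw [hfreq]; exact PySem.Dict.keys_counter values
    set ks := PySem.List.sorted ((pvFreq values).keys) (fun x => x) false with hks
    have hks' : ks = PySem.List.sorted (PySem.Set.ofList values) (fun x => x) false := by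
      rw [hks, hkeys]
    have hpl : ks.Pairwise (· < ·) := by
      rw [hks']; exact PySem.List.sorted_ofList_pairwise_lt values
    have hnd : ks.Nodup := hpl.imp (fun h => ne_of_lt h)
    have hmem : ∀ x, x ∈ ks ↔ x ∈ values := by
      intro x
      rw [hks', PySem.List.mem_sorted, PySem.Set.mem_ofList]
    have hperm := pv_perm_rep values ks hnd hmem
    have hsorted : PySem.List.sorted values (fun x => x) false = pvRep values ks :=
      PySem.List.sorted_id_eq_of_perm_of_pairwise _ _ hperm (pv_pairwise_rep values ks hpl)
    have hreplen : ((pvRep values ks).length : Int) = (values.length : Int) := by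
      exact_mod_cast hperm.length_eq
    have hcnt : ∀ k ∈ ks, (pvFreq values).getD k 0 = (values.count k : Int) := by
      intro k _
      rw [hfreq]; exact PySem.Dict.getD_counter values k
    have hn1 : 1 ≤ (values.length : Int) := by
      have := List.length_pos_iff.mpr hv; omega
    -- one percentile
    have hperc : ∀ p : Int,
        (if values = [] then none
         else
           let sorted_values := PySem.List.sorted values (fun x => x) false
           let rank : Int := -(PySem.Int.floordiv (-(p * (sorted_values.length : Int))) 100)
           let idx : Int := max 0 (min ((sorted_values.length : Int) - 1) (rank - 1))
           some (PySem.List.pyGetD sorted_values idx 0))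
        = some ((fun r =>
            match pvKthLoop (pvFreq values) r ks 0 with
            | some k => k
            | none => PySem.List.pyGetD ks (-1) 0)
          (min (values.length : Int)
            (max 1 (-(PySem.Int.floordiv (-(p * (values.length : Int))) 100))))) := by
      intro p
      rw [if_neg hv]
      simp only [PySem.List.length_sorted]
      set rA : Int := -(PySem.Int.floordiv (-(p * (values.length : Int))) 100) with hrA
      set r : Int := min (values.length : Int) (max 1 rA) with hr
      have h1 : (0:Int) < r := by rw [hr]; omega
      have h2 : r ≤ 0 + ((pvRep values ks).length : Int) := by rw [hreplen, hr]; omega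
      rw [pv_kth_loop_spec (pvFreq values) values ks hcnt r 0 h1 h2]
      have hidx : max 0 (min ((values.length : Int) - 1) (rA - 1)) = r - 0 - 1 := by
        rw [hr]; omega
      rw [hsorted, hidx]
    match breach_threshold with
    | none =>
      have h50 := hperc 50
      have h90 := hperc 90
      have h95 := hperc 95
      rw [if_neg hv] at h50 h90 h95
      simp only [if_neg hv, ← hks]
      rw [h50, h90, h95]
    | some t =>
      have h50 := hperc 50
      have h90 := hperc 90
      have h95 := hperc 95
      rw [if_neg hv] at h50 h90 h95
      have hb : ((values.filter (fun v => t < v)).map (fun _ => (1 : Int))).sum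
          = ((ks.filter (fun k => t < k)).map (fun k => (pvFreq values).getD k 0)).sum := by
        rw [PySem.List.sum_map_const_int, mul_one]
        have hfilt := (hperm.filter (fun v => decide (t < v))).length_eq
        have : ((ks.filter (fun k => t < k)).map (fun k => (pvFreq values).getD k 0))
            = ((ks.filter (fun k => t < k)).map (fun k => (values.count k : Int))) := by
          apply List.map_congr_left
          intro k hk
          exact hcnt k (List.mem_of_mem_filter hk)
        rw [this, ← pv_filter_rep values ks (fun k => decide (t < k))]
        exact_mod_cast hfilt.symm
      simp only [if_neg hv, ← hks]
      rw [h50, h90, h95, hb]
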